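-- pv_equiv track=rewrite | github.com/EconForge/interpolation.py | interpolation/splines/gen_multilinear_irregular.py | make_formula
-- ===== SOURCE A (Python) =====
-- def index(inds):
--     return str.join('',  [str(e) for e in inds] )
--
-- def make_formula(d,ind,mm):
--     if len(ind) == d:
--         return 'v_{}'.format(index(ind))
--     else:
--         j = len(ind)
--         ind1 = ind + (0,)
--         ind2 = ind + (1,)
--         s = "(1-lam_{j})*({a}) + (lam_{j})*({b})".format(j=j, a=make_formula(d,ind1,mm), b=make_formula(d,ind2,mm))
--         return s
-- ===== SOURCE B (Python) =====
-- def make_formula(d, ind, mm):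
--     # Bottom-up: enumerate the leaf names, then merge adjacent pairs once per
--     # dimension, innermost (last) dimension first, until one formula remains.
--     lo = len(ind)
--     prefix = ''.join(str(e) for e in ind)
--     suffixes = ['']
--     for _ in range(d - lo):
--         suffixes = [s + b for s in suffixes for b in ('0', '1')]
--     level = ['v_' + prefix + s for s in suffixes]
--     for k in range(d - 1, lo - 1, -1):
--         level = ['(1-lam_{j})*({a}) + (lam_{j})*({b})'.format(j=k, a=a, b=b)
--                  for a, b in zip(level[0::2], level[1::2])]
--     return level[0]
-- ===== Notes on version B (the rewrite author's own statement) =====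
-- stated objective: alternative
-- what changed: Replaces A's top-down recursion (which rebuilds the index tuple and re-joins it at every leaf) with a bottom-up pass: enumerate the 2^(d-len(ind)) leaf names once from a precomputed prefix, then merge adjacent pairs in a loop, one round per dimension from innermost to outermost.
import Mathlib
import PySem

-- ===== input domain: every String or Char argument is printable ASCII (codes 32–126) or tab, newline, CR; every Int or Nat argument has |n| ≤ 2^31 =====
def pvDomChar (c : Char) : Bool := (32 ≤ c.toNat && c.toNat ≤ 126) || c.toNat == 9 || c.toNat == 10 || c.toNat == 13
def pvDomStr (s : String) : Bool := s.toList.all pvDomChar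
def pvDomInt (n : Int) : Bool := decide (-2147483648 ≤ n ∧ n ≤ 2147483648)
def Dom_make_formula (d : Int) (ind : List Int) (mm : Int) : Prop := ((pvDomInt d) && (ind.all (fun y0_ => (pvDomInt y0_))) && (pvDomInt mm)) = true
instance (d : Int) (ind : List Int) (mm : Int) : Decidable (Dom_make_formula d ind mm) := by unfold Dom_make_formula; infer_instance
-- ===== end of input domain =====

-- B builds the formula bottom-up (leaf list + pairwise merge loop) instead of A's top-down
-- recursion; objective: alternative decomposition, same output size, no speed claim.

-- ===== PORT A =====
-- ''.join(str(e) for e in inds): exact — ''.join concatenates the pieces left to right.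
def pvIndexStr (inds : List Int) : String := (inds.map PySem.Int.toStr).foldl (· ++ ·) ""

-- A's recursion, with the remaining depth d - len(ind) made an explicit fuel argument so the
-- function is total; on Pre_ (len(ind) ≤ d) the fuel test 'n = 0' is exactly A's 'len(ind) == d'.
def pvMfA : Nat → List Int → String
  | 0, ind => "v_" ++ pvIndexStr ind
  | n + 1, ind =>
      "(1-lam_" ++ PySem.Int.toStr (ind.length : Int) ++ ")*(" ++ pvMfA n (ind ++ [0])
        ++ ") + (lam_" ++ PySem.Int.toStr (ind.length : Int) ++ ")*(" ++ pvMfA n (ind ++ [1]) ++ ")"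

def make_formula (d : Int) (ind : List Int) (mm : Int) : String :=
  pvMfA (d - (ind.length : Int)).toNat ind

-- ===== PORT B =====
-- '(1-lam_{j})*({a}) + (lam_{j})*({b})'.format(j=k, a=a, b=b)
def pvMerge (k : Int) (a b : String) : String :=
  "(1-lam_" ++ PySem.Int.toStr k ++ ")*(" ++ a ++ ") + (lam_" ++ PySem.Int.toStr k ++ ")*(" ++ b ++ ")"

-- one pass of Source B's suffix loop: [s + b for s in suffixes for b in ('0','1')]
def pvSufStep (l : List String) : List String := l.flatMap (fun s => [s ++ "0", s ++ "1"])

-- the loop 'for _ in range(d - lo): suffixes = …' run n times from ['']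
def pvSufs : Nat → List String
  | 0 => [""]
  | n + 1 => pvSufStep (pvSufs n)

-- [merge for a,b in zip(level[0::2], level[1::2])]: zipping the even- and odd-indexed slices
-- pairs adjacent elements and drops a trailing unpaired one — exactly this recursion.
def pvMergePairs (k : Int) : List String → List String
  | a :: b :: rest => pvMerge k a b :: pvMergePairs k rest
  | _ => []

-- 'for k in range(d-1, lo-1, -1)': n = d - lo iterations, first k = lo + n - 1, last k = lo
def pvMergeLoop (lo : Int) : Nat → List String → List String
  | 0, l => l
  | n + 1, l => pvMergeLoop lo n (pvMergePairs (lo + (n : Int)) l)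

def make_formula_alt (d : Int) (ind : List Int) (mm : Int) : String :=
  let lo : Int := (ind.length : Int)
  let n : Nat := (d - lo).toNat
  let pre : String := pvIndexStr ind
  let level := (pvSufs n).map (fun s => "v_" ++ pre ++ s)
  -- level[0]; the loop always leaves exactly one element, so the default is never used
  (pvMergeLoop lo n level).headD ""

-- ===== PRECONDITION & SPEC =====
-- Pre_ excludes len(ind) > d, where Python A recurses forever (RecursionError): len(ind) only
-- grows, never reaching d.  It does not otherwise narrow A's domain.
def Pre_make_formula (d : Int) (ind : List Int) (mm : Int) : Prop := (ind.length : Int) ≤ d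
instance (d : Int) (ind : List Int) (mm : Int) : Decidable (Pre_make_formula d ind mm) := by
  unfold Pre_make_formula; infer_instance
def pvWitness_make_formula : Int × List Int × Int := (2, [1], 0)

def Spec_make_formula (d : Int) (ind : List Int) (mm : Int) (out : String) : Prop := out = make_formula_alt d ind mm
instance (d : Int) (ind : List Int) (mm : Int) (out : String) : Decidable (Spec_make_formula d ind mm out) := by unfold Spec_make_formula; infer_instance

-- ===== CLAIM (what is proved, stated in full; the proofs are below) =====
def Claim_equal_make_formula : Prop := ∀ (d : Int) (ind : List Int) (mm : Int), Dom_make_formula d ind mm → Pre_make_formula d ind mm → Spec_make_formula d ind mm (make_formula d ind mm)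

-- ===== LEMMAS AND PROOFS =====

theorem pvIndexStr_append (inds : List Int) (x : Int) :
    pvIndexStr (inds ++ [x]) = pvIndexStr inds ++ PySem.Int.toStr x := by
  simp only [pvIndexStr, List.map_append, List.foldl_append, List.map_cons, List.map_nil,
    List.foldl_cons, List.foldl_nil]

-- the generalized bottom-up value: n merge rounds over the 2^n suffixes, leaves given by f
def pvG : Nat → Int → (String → String) → String
  | 0, _, f => f ""
  | n + 1, lo, f => pvG n lo (fun s => pvMerge (lo + (n : Int)) (f (s ++ "0")) (f (s ++ "1")))

theorem pvMergePairs_map (k : Int) (l : List String) (f : String → String) :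
    pvMergePairs k ((pvSufStep l).map f)
      = l.map (fun s => pvMerge k (f (s ++ "0")) (f (s ++ "1"))) := by
  induction l with
  | nil => rfl
  | cons x t ih =>
    simp only [pvSufStep] at ih ⊢
    simp only [List.flatMap_cons, List.map_cons, List.cons_append, List.nil_append,
      pvMergePairs, ih]

theorem pvMergeLoop_sufs (n : Nat) (lo : Int) (f : String → String) :
    pvMergeLoop lo n ((pvSufs n).map f) = [pvG n lo f] := by
  induction n generalizing f with
  | zero => rfl
  | succ n ih => simp only [pvSufs, pvMergeLoop, pvMergePairs_map, ih, pvG]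

-- pvG also satisfies A's top-down (most-significant-bit-first) recursion
theorem pvG_msb (n : Nat) (lo : Int) (f : String → String) :
    pvG (n + 1) lo f
      = pvMerge lo (pvG n (lo + 1) (fun s => f ("0" ++ s))) (pvG n (lo + 1) (fun s => f ("1" ++ s))) := by
  induction n generalizing lo f with
  | zero => simp [pvG]
  | succ n ih =>
    show pvG (n + 1) lo (fun s => pvMerge (lo + ((n:Nat)+1 : Nat)) (f (s ++ "0")) (f (s ++ "1"))) = _
    rw [ih]
    show _ = pvMerge lo (pvG (n+1) (lo + 1) _) (pvG (n+1) (lo + 1) _)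
    simp only [pvG]
    congr 1
    · congr 1
      funext s
      have hk : (lo + (((n:Nat)+1 : Nat) : Int)) = (lo + 1) + (n : Int) := by push_cast; ring
      rw [hk, String.append_assoc, String.append_assoc]
    · congr 1
      funext s
      have hk : (lo + (((n:Nat)+1 : Nat) : Int)) = (lo + 1) + (n : Int) := by push_cast; ring
      rw [hk, String.append_assoc, String.append_assoc]

theorem pvMfA_eq_pvG (n : Nat) (ind : List Int) :
    pvMfA n ind = pvG n (ind.length : Int) (fun s => "v_" ++ pvIndexStr ind ++ s) := by
  induction n generalizing ind with
  | zero => simp [pvMfA, pvG]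
  | succ n ih =>
    rw [pvG_msb]
    have h0 : (fun s => ("v_" ++ pvIndexStr ind ++ ("0" ++ s) : String))
        = (fun s => "v_" ++ pvIndexStr (ind ++ [0]) ++ s) := by
      funext s
      rw [pvIndexStr_append]
      have t0 : PySem.Int.toStr (0 : Int) = "0" := by decide
      rw [t0]
      simp [String.append_assoc]
    have h1 : (fun s => ("v_" ++ pvIndexStr ind ++ ("1" ++ s) : String))
        = (fun s => "v_" ++ pvIndexStr (ind ++ [1]) ++ s) := by
      funext s
      rw [pvIndexStr_append]
      have t1 : PySem.Int.toStr (1 : Int) = "1" := by decide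
      rw [t1]
      simp [String.append_assoc]
    simp only [pvMfA, pvMerge, h0, h1]
    rw [ih (ind ++ [0]), ih (ind ++ [1])]
    have hl0 : (((ind ++ [0]).length : Int)) = (ind.length : Int) + 1 := by simp
    have hl1 : (((ind ++ [1]).length : Int)) = (ind.length : Int) + 1 := by simp
    rw [hl0, hl1]

-- ===== VERDICT (by name: the statement is the Claim_ definition above) =====
theorem make_formula_spec : Claim_equal_make_formula := by
  intro d ind mm _hdom _hpre
  show make_formula d ind mm = make_formula_alt d ind mm
  simp only [make_formula, make_formula_alt, pvMergeLoop_sufs, List.headD, pvMfA_eq_pvG]
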